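-- pv_equiv track=rewrite | github.com/Thomasedv/Grabber | core.py | path_shortener
-- ===== SOURCE A (Python) =====
-- def path_shortener(full_path):
--     full_path = full_path.replace('%(title)s.%(ext)s', '')
--     if full_path[-1] != '/':
--         full_path = ''.join([full_path, '/'])
--
--     if len(full_path) > 15:
--         times = 0
--         for integer, letter in enumerate(reversed(full_path)):
--             if letter == '/':
--                 split = -integer - 1
--                 times += 1
--                 if times == 3:
--                     break
--         else:
--             raise Exception(''.join(['Something went wrong with path shortening! Path:', full_path]))
--
--         short_path = ''.join([full_path[0:3], '...', full_path[split:]])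
--     else:
--         short_path = full_path
--
--     if not short_path[-1] == '/':
--         short_path += '/'
--
--     return short_path
-- ===== SOURCE B (Python) =====
-- def path_shortener(full_path):
--     full_path = full_path.replace('%(title)s.%(ext)s', '')
--     if full_path[-1] != '/':
--         full_path += '/'
--     if len(full_path) <= 15:
--         return full_path
--     slashes = [i for i, c in enumerate(full_path) if c == '/']
--     if len(slashes) < 3:
--         raise Exception('Something went wrong with path shortening! Path:' + full_path)
--     return full_path[:3] + '...' + full_path[slashes[-3]:]
-- ===== Notes on version B (the rewrite author's own statement) =====
-- stated objective: simpler
-- what changed: Replaces the backward scan over enumerate(reversed(path)) with its break/for-else and negative-index bookkeeping by a forward comprehension of all slash positions, then cutting the path at the third-from-last position; early returns replace the nested branch structure.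
import Mathlib
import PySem

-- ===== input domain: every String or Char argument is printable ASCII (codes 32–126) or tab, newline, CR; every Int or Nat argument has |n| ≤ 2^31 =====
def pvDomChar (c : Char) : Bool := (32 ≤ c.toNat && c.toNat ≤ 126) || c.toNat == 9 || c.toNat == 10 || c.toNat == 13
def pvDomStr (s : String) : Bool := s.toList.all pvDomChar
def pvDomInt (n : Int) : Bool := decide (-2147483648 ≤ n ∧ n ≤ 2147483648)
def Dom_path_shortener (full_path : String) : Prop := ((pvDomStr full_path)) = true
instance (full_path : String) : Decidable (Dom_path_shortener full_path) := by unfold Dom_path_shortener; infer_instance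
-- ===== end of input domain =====

-- B replaces A's backward scan over the reversed string (break at the third '/', for-else raise)
-- by a forward comprehension of all slash positions indexed from the end: simpler decomposition, same O(n) cost.

-- ===== PORT A =====
-- A's loop 'for integer, letter in enumerate(reversed(full_path))' with break at the third '/'.
-- 'some split' is the break; 'none' is the for-else raise path (excluded by Pre_).
def psLoop : List Char → Int → Int → Option Int
  | [], _, _ => none
  | letter :: rest, integer, times =>
    if letter = '/' then
      (if times + 1 = 3 then some (-integer - 1)
       else psLoop rest (integer + 1) (times + 1))
    else psLoop rest (integer + 1) times

def path_shortener (full_path : String) : String :=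
  let fp0 := (PySem.Str.replace full_path "%(title)s.%(ext)s" "").toList
  let fp := if PySem.List.pyGet? fp0 (-1) ≠ some '/' then fp0 ++ ['/'] else fp0
  let short :=
    if 15 < fp.length then
      match psLoop fp.reverse 0 0 with
      | some split =>
          PySem.List.slice fp (some 0) (some 3) ++ "...".toList ++ PySem.List.slice fp (some split) none
      | none => []  -- Python raises Exception here; outside Pre_
    else fp
  let short := if PySem.List.pyGet? short (-1) ≠ some '/' then short ++ ['/'] else short
  String.ofList short

-- ===== PORT B =====
def path_shortener_alt (full_path : String) : String :=
  let fp0 := (PySem.Str.replace full_path "%(title)s.%(ext)s" "").toList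
  let fp := if PySem.List.pyGet? fp0 (-1) ≠ some '/' then fp0 ++ ['/'] else fp0
  if fp.length ≤ 15 then String.ofList fp
  else
    let slashes := ((PySem.List.enumerate fp 0).filter (fun p => p.2 == '/')).map (fun p => p.1)
    if slashes.length < 3 then String.ofList []  -- Python raises Exception here; outside Pre_
    else
      match PySem.List.pyGet? slashes (-3) with
      | some idx =>
          String.ofList (PySem.List.slice fp none (some 3) ++ "...".toList ++ PySem.List.slice fp (some idx) none)
      | none => String.ofList []  -- unreachable: slashes has ≥ 3 elements

-- ===== PRECONDITION & SPEC =====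
-- Pre_ excludes exactly the inputs where Python A raises: the empty path after the replace
-- (IndexError on full_path[-1]) and paths longer than 15 after normalisation that contain
-- fewer than 3 slashes (A's explicit 'raise Exception'); B raises identically there.
def Pre_path_shortener (full_path : String) : Prop :=
  let fp0 := (PySem.Str.replace full_path "%(title)s.%(ext)s" "").toList
  fp0 ≠ [] ∧
    (let g := if fp0.getLast? = some '/' then fp0 else fp0 ++ ['/']
     g.length ≤ 15 ∨ 3 ≤ g.count '/')
instance (full_path : String) : Decidable (Pre_path_shortener full_path) := by
  unfold Pre_path_shortener; infer_instance

def pvWitness_path_shortener : String := "ab"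

def Spec_path_shortener (full_path : String) (out : String) : Prop := out = path_shortener_alt full_path
instance (full_path : String) (out : String) : Decidable (Spec_path_shortener full_path out) := by unfold Spec_path_shortener; infer_instance

-- ===== CLAIM (what is proved, stated in full; the proofs are below) =====
def Claim_equal_path_shortener : Prop := ∀ (full_path : String), Dom_path_shortener full_path → Pre_path_shortener full_path → Spec_path_shortener full_path (path_shortener full_path)

-- ===== LEMMAS AND PROOFS =====

-- slash positions of a list, ascending (proof-side helper)
def spos : List Char → List Nat
  | [] => []
  | c :: r => if c = '/' then 0 :: (spos r).map (· + 1) else (spos r).map (· + 1)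

theorem spos_bridge (cs : List Char) (i : Int) :
    ((PySem.List.enumerate cs i).filter (fun p => p.2 == '/')).map (fun p => p.1)
      = (spos cs).map (fun (q : Nat) => i + (q : Int)) := by
  induction cs generalizing i with
  | nil => simp [PySem.List.enumerate_nil, spos]
  | cons c r ih =>
    rw [PySem.List.enumerate_cons, List.filter_cons]
    by_cases hc : c = '/'
    · rw [if_pos (by simp [hc]), List.map_cons, ih (i + 1)]
      rw [spos, if_pos hc, List.map_cons, List.map_map]
      refine congrArg₂ _ (by norm_num) ?_
      exact List.map_congr_left (fun a _ => by simp [Function.comp]; ring)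
    · rw [if_neg (by simp [hc]), ih (i + 1)]
      rw [spos, if_neg hc, List.map_map]
      exact List.map_congr_left (fun a _ => by simp [Function.comp]; ring)

theorem psLoop_eq (t : List Char) (i times : Int) (h0 : 0 ≤ times) (h3 : times < 3) :
    psLoop t i times = ((spos t)[(2 - times).toNat]?).map (fun (q : Nat) => -(i + (q : Int)) - 1) := by
  induction t generalizing i times with
  | nil => simp [psLoop, spos]
  | cons c r ih =>
    by_cases hc : c = '/'
    · by_cases hb : times + 1 = 3
      · have ht : times = 2 := by omega
        simp [psLoop, hc, ht, spos]
      · have h3' : times + 1 < 3 := by omega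
        have hk : (2 - times).toNat = (2 - (times + 1)).toNat + 1 := by omega
        rw [psLoop]
        simp only [hc, if_true, hb, if_false, ih (i + 1) (times + 1) (by omega) h3']
        simp [spos, hk, List.getElem?_map]
        cases (spos r)[(2 - (times + 1)).toNat]? <;> simp
        ring
    · rw [psLoop]
      simp only [hc, if_false, ih (i + 1) times h0 h3]
      simp [spos, hc, List.getElem?_map]
      cases (spos r)[(2 - times).toNat]? <;> simp
      ring

theorem spos_append (u v : List Char) :
    spos (u ++ v) = spos u ++ (spos v).map (· + u.length) := by
  induction u with
  | nil => simp [spos]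
  | cons c u' ih =>
    by_cases hc : c = '/' <;> simp [spos, hc, ih, List.map_map]

theorem spos_reverse (cs : List Char) :
    spos cs.reverse = ((spos cs).map (fun q => cs.length - 1 - q)).reverse := by
  induction cs with
  | nil => simp [spos]
  | cons c r ih =>
    rw [List.reverse_cons, spos_append, ih]
    by_cases hc : c = '/' <;>
      simp [spos, hc, List.map_map, Function.comp] <;>
      (intro a _; omega)

theorem spos_lt (cs : List Char) (q : Nat) (hq : q ∈ spos cs) : q < cs.length := by
  induction cs generalizing q with
  | nil => simp [spos] at hq
  | cons c r ih =>
    by_cases hc : c = '/' <;> simp [spos, hc] at hq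
    · rcases hq with h | ⟨a, ha, rfl⟩
      · simp [h]
      · have := ih a ha; simp; omega
    · rcases hq with ⟨a, ha, rfl⟩
      have := ih a ha; simp; omega

theorem spos_length (cs : List Char) : (spos cs).length = cs.count '/' := by
  induction cs with
  | nil => simp [spos]
  | cons c r ih =>
    by_cases hc : c = '/' <;> simp [spos, hc, ih]

-- the two ports agree on any normalised path (nonempty, ending in '/')
theorem main_eq (g : List Char) (hlast : g.getLast? = some '/')
    (hpre : g.length ≤ 15 ∨ 3 ≤ g.count '/') :
    (let short :=
      if 15 < g.length then
        match psLoop g.reverse 0 0 with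
        | some split =>
            PySem.List.slice g (some 0) (some 3) ++ "...".toList ++ PySem.List.slice g (some split) none
        | none => []
      else g
     let short := if short.getLast? ≠ some '/' then short ++ ['/'] else short
     String.ofList short)
    = (if g.length ≤ 15 then String.ofList g
       else
        let slashes := ((PySem.List.enumerate g 0).filter (fun p => p.2 == '/')).map (fun p => p.1)
        if slashes.length < 3 then String.ofList []
        else
          match PySem.List.pyGet? slashes (-3) with
          | some idx =>
              String.ofList (PySem.List.slice g none (some 3) ++ "...".toList ++ PySem.List.slice g (some idx) none)
          | none => String.ofList []) := by
  by_cases hlen : 15 < g.length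
  · -- long case
    have hcnt : 3 ≤ g.count '/' := hpre.resolve_left (by omega)
    have hm : 3 ≤ (spos g).length := by rw [spos_length]; exact hcnt
    set S := spos g with hS
    have h2 : 2 < (S.map (fun q => g.length - 1 - q)).length := by
      rw [List.length_map]; omega
    have hidx : S.length - 1 - 2 = S.length - 3 := by omega
    have hg3 : S.length - 3 < S.length := by omega
    set q := S[S.length - 3] with hqdef
    have hqmem : q ∈ S := List.getElem_mem _
    have hql : q < g.length := spos_lt g q (by rw [hS] at hqmem; exact hqmem)
    have hloop : psLoop g.reverse 0 0 = some (-(((g.length - 1 - q : Nat) : Int)) - 1) := by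
      rw [psLoop_eq g.reverse 0 0 (by norm_num) (by norm_num)]
      rw [show ((2 : Int) - 0).toNat = 2 from rfl]
      rw [spos_reverse, ← hS, List.getElem?_reverse h2]
      simp only [List.length_map, hidx, List.getElem?_map, List.getElem?_eq_getElem hg3]
      rw [← hqdef]
      simp
    have hbr : ((PySem.List.enumerate g 0).filter (fun p => p.2 == '/')).map (fun p => p.1)
        = S.map (fun (q : Nat) => (q : Int)) := by
      rw [spos_bridge g 0, ← hS]
      exact List.map_congr_left (fun a _ => zero_add _)
    have hget : PySem.List.pyGet? (S.map (fun (q : Nat) => (q : Int))) (-3) = some (q : Int) := by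
      rw [PySem.List.pyGet?_neg_ofNat _ 3 (by norm_num) (by rw [List.length_map]; omega)]
      rw [List.length_map, List.getElem?_map, List.getElem?_eq_getElem hg3, ← hqdef]
      rfl
    have hsplit : (-(((g.length - 1 - q : Nat) : Int)) - 1) = -(((g.length - q : Nat) : Int)) := by
      omega
    have htailA : PySem.List.slice g (some (-(((g.length - 1 - q : Nat) : Int)) - 1)) none = g.drop q := by
      rw [hsplit, PySem.List.slice_from_neg_natCast g (g.length - q) (by omega)]
      congr 1; omega
    have htailB : PySem.List.slice g (some ((q : Nat) : Int)) none = g.drop q := by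
      rw [PySem.List.slice_from_natCast]
    have hlastshort :
        (PySem.List.slice g (some 0) (some 3) ++ "...".toList ++ g.drop q).getLast? = some '/' := by
      rw [List.getLast?_append, List.getLast?_append]
      have hdl : (g.drop q).getLast? = some '/' := by
        rw [List.getLast?_drop, if_neg (by omega : ¬ g.length ≤ q), hlast]
      simp [hdl]
    simp only [if_pos hlen, if_neg (show ¬ g.length ≤ 15 by omega), hloop, hbr,
      List.length_map, if_neg (show ¬ S.length < 3 by omega), hget, htailA, htailB]
    rw [hlastshort, if_neg (show ¬ (some '/' ≠ some '/') by simp), PySem.List.slice_zero_start]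
  · -- short case: both return g (A's final trailing-slash guard is a no-op)
    simp only [if_neg hlen, if_pos (show g.length ≤ 15 by omega)]
    rw [hlast, if_neg (show ¬ (some '/' ≠ some '/') by simp)]

-- ===== VERDICT (by name: the statement is the Claim_ definition above) =====
theorem path_shortener_spec : Claim_equal_path_shortener := by
  intro s _ hpre
  show path_shortener s = path_shortener_alt s
  unfold Pre_path_shortener at hpre
  unfold path_shortener path_shortener_alt
  generalize (PySem.Str.replace s "%(title)s.%(ext)s" "").toList = fp0 at hpre ⊢
  obtain ⟨_hne, hrest⟩ := hpre
  simp only [PySem.List.pyGet?_neg_one]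
  by_cases h : fp0.getLast? = some '/'
  · simp only [h, ne_eq, not_true_eq_false, if_false]
    exact main_eq fp0 h (by simpa [h] using hrest)
  · simp only [if_pos (show fp0.getLast? ≠ some '/' from h)]
    exact main_eq (fp0 ++ ['/']) (by simp) (by simpa [h] using hrest)
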